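-- pv_equiv track=rewrite | github.com/junhyeong7788/Python-Problem-Solving | 프로그래머스/0/181860. 빈 배열에 추가， 삭제하기/빈 배열에 추가， 삭제하기.py | solution
-- ===== SOURCE A (Python) =====
-- def solution(arr, flag):
--     X = []
--     for i in range(len(arr)):
--         if flag[i]:
--             X.extend([arr[i]] * (arr[i] * 2))
--         else:
--             for _ in range(arr[i]):
--                 if X:
--                     X.pop()
--     return X
-- ===== SOURCE B (Python) =====
-- def solution(arr, flag):
--     # Run-length stack: keep (value, count) runs and expand only at the end.
--     runs = []
--     for i, v in enumerate(arr):
--         if flag[i]: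
--             if v > 0:
--                 runs.append((v, 2 * v))
--         else:
--             k = v
--             while k > 0 and runs:
--                 val, c = runs[-1]
--                 if c <= k:
--                     runs.pop()
--                     k -= c
--                 else:
--                     runs[-1] = (val, c - k)
--                     k = 0
--     out = []
--     for val, c in runs:
--         out.extend([val] * c)
--     return out
-- ===== Notes on version B (the rewrite author's own statement) =====
-- stated objective: faster
-- what changed: Replaces A's element-by-element list extend/pop (work proportional to the sum of the element values) by a run-length stack of (value,count) runs, popping counts lazily and expanding to a concrete list only once at the end.
import Mathlib
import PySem

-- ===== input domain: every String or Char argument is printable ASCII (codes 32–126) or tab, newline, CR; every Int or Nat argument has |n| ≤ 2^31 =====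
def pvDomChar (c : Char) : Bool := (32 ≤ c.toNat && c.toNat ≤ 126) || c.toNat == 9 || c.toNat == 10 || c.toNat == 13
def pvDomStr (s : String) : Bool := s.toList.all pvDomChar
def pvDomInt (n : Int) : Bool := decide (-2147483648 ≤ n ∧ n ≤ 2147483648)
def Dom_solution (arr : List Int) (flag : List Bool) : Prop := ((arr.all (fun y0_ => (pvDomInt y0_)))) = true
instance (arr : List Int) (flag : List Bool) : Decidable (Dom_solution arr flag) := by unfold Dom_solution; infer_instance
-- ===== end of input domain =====

-- B replaces A's element-by-element extend/pop (O(sum of values) work) by a run-length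
-- stack of (value, count) runs expanded only at the end.

-- ===== PORT A =====
-- inner 'for _ in range(arr[i]): if X: X.pop()'
def popLoopA (X : List Int) : Nat → List Int
  | 0 => X
  | n + 1 => popLoopA (if X.isEmpty then X else X.dropLast) n

def solution (arr : List Int) (flag : List Bool) : List Int :=
  (PySem.List.pyRange 0 arr.length 1).foldl
    (fun X i =>
      if PySem.List.pyGetD flag i false then
        X ++ List.replicate ((PySem.List.pyGetD arr i 0) * 2).toNat (PySem.List.pyGetD arr i 0)
      else
        popLoopA X (PySem.List.pyGetD arr i 0).toNat)
    []

-- ===== PORT B =====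
-- Source B's while-loop trimming the run stack from the top (stack head = top of stack)
def popRunsB : Int → List (Int × Int) → List (Int × Int)
  | _, [] => []
  | k, (v, c) :: rs =>
      if k ≤ 0 then (v, c) :: rs
      else if c ≤ k then popRunsB (k - c) rs
      else (v, c - k) :: rs

def solution_alt (arr : List Int) (flag : List Bool) : List Int :=
  let runs :=
    (PySem.List.enumerate arr).foldl
      (fun rs iv =>
        if PySem.List.pyGetD flag iv.1 false then
          (if 0 < iv.2 then (iv.2, 2 * iv.2) :: rs else rs)
        else popRunsB iv.2 rs)
      []
  runs.reverse.foldl (fun out vc => out ++ List.replicate vc.2.toNat vc.1) []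

-- ===== PRECONDITION & SPEC =====
-- Pre_ excludes only inputs where flag is shorter than arr: there Python A raises IndexError.
def Pre_solution (arr : List Int) (flag : List Bool) : Prop := arr.length ≤ flag.length
instance (arr : List Int) (flag : List Bool) : Decidable (Pre_solution arr flag) := by unfold Pre_solution; infer_instance
def pvWitness_solution : List Int × List Bool := ([3, 2, 4], [true, false, true])
def Spec_solution (arr : List Int) (flag : List Bool) (out : List Int) : Prop := out = solution_alt arr flag
instance (arr : List Int) (flag : List Bool) (out : List Int) : Decidable (Spec_solution arr flag out) := by unfold Spec_solution; infer_instance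

-- ===== CLAIM (what is proved, stated in full; the proofs are below) =====
def Claim_equal_solution : Prop := ∀ (arr : List Int) (flag : List Bool), Dom_solution arr flag → Pre_solution arr flag → Spec_solution arr flag (solution arr flag)

-- ===== LEMMAS AND PROOFS =====

-- expansion of a run stack (head = top of stack, hence the reverse)
def pvExpand (rs : List (Int × Int)) : List Int :=
  rs.reverse.foldl (fun out vc => out ++ List.replicate vc.2.toNat vc.1) []

def pvAllPos (rs : List (Int × Int)) : Prop := ∀ p ∈ rs, 0 < p.2

theorem pvExpand_cons (v c : Int) (rs : List (Int × Int)) :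
    pvExpand ((v, c) :: rs) = pvExpand rs ++ List.replicate c.toNat v := by
  simp [pvExpand, List.foldl_append]

theorem popLoopA_eq_take (n : Nat) : ∀ (X : List Int),
    popLoopA X n = X.take (X.length - n) := by
  induction n with
  | zero => intro X; simp [popLoopA]
  | succ n ih =>
    intro X
    rcases X.eq_nil_or_concat with h | ⟨Y, a, h⟩
    · simp [h, popLoopA, ih]
    · subst h
      rw [popLoopA, if_neg (by simp), List.concat_eq_append, List.dropLast_concat, ih]
      have hl : (Y ++ [a]).length - (n + 1) = Y.length - n := by
        simp only [List.length_append, List.length_cons, List.length_nil]; omega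
      rw [hl, List.take_append_of_le_length (by omega)]

theorem popRunsB_spec (rs : List (Int × Int)) : ∀ (k : Int), pvAllPos rs →
    pvExpand (popRunsB k rs) = (pvExpand rs).take ((pvExpand rs).length - k.toNat) ∧
      pvAllPos (popRunsB k rs) := by
  induction rs with
  | nil => intro k _; simp [popRunsB, pvExpand, pvAllPos]
  | cons p rs ih =>
    intro k hpos
    obtain ⟨v, c⟩ := p
    have hc : 0 < c := hpos (v, c) (by simp)
    have hpos' : pvAllPos rs := fun q hq => hpos q (by simp [hq])
    by_cases hk : k ≤ 0
    · simp [popRunsB, hk]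
      constructor
      · have : k.toNat = 0 := by omega
        simp [this]
      · exact hpos
    · by_cases hck : c ≤ k
      · have hih := ih (k - c) hpos'
        simp only [popRunsB, if_neg hk, if_pos hck]
        refine ⟨?_, hih.2⟩
        rw [hih.1, pvExpand_cons]
        have hlen : ((pvExpand rs) ++ List.replicate c.toNat v).length =
            (pvExpand rs).length + c.toNat := by simp
        rw [hlen, List.take_append_of_le_length (by omega)]
        congr 1
        omega
      · simp only [popRunsB, if_neg hk, if_neg hck]
        constructor
        · rw [pvExpand_cons, pvExpand_cons]
          have h1 : (pvExpand rs ++ List.replicate c.toNat v).length - k.toNat =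
              (pvExpand rs).length + (c.toNat - k.toNat) := by
            rw [List.length_append, List.length_replicate]; omega
          rw [h1, List.take_append, List.take_of_length_le (by omega), List.take_replicate]
          congr 2
          omega
        · intro q hq
          rcases List.mem_cons.mp hq with h | h
          · subst h; simp; omega
          · exact hpos' q h
  
-- one loop step preserves the relation X = expand rs (for the same values v, b)
theorem pvStep (b : Bool) (v : Int) (X : List Int) (rs : List (Int × Int))
    (hX : X = pvExpand rs) (hpos : pvAllPos rs) :
    (if b then X ++ List.replicate (v * 2).toNat v else popLoopA X v.toNat) =
      pvExpand (if b then (if 0 < v then (v, 2 * v) :: rs else rs) else popRunsB v rs) ∧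
      pvAllPos (if b then (if 0 < v then (v, 2 * v) :: rs else rs) else popRunsB v rs) := by
  cases b with
  | true =>
    simp only [if_true]
    by_cases hv : 0 < v
    · rw [if_pos hv, pvExpand_cons, hX]
      refine ⟨by rw [Int.mul_comm], fun q hq => ?_⟩
      rcases List.mem_cons.mp hq with h | h
      · subst h; simpa using by omega
      · exact hpos q h
    · rw [if_neg hv]
      have h0 : (v * 2).toNat = 0 := by omega
      simp [h0, hX, hpos]
  | false =>
    simp only [if_neg (by simp : ¬(false = true))]
    have h := popRunsB_spec rs v hpos
    exact ⟨by rw [hX, popLoopA_eq_take, h.1], h.2⟩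

-- the two folds over the same index list agree
theorem pvLoop (arr : List Int) (flag : List Bool) :
    ∀ (l : List Int) (X : List Int) (rs : List (Int × Int)),
      X = pvExpand rs → pvAllPos rs →
      l.foldl (fun X i =>
          if PySem.List.pyGetD flag i false then
            X ++ List.replicate ((PySem.List.pyGetD arr i 0) * 2).toNat (PySem.List.pyGetD arr i 0)
          else popLoopA X (PySem.List.pyGetD arr i 0).toNat) X
        = pvExpand (l.foldl (fun rs i =>
            if PySem.List.pyGetD flag i false then
              (if 0 < PySem.List.pyGetD arr i 0 then
                (PySem.List.pyGetD arr i 0, 2 * PySem.List.pyGetD arr i 0) :: rs else rs)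
            else popRunsB (PySem.List.pyGetD arr i 0) rs) rs) := by
  intro l
  induction l with
  | nil => intro X rs hX _; simpa using hX
  | cons i l ih =>
    intro X rs hX hpos
    have h := pvStep (PySem.List.pyGetD flag i false) (PySem.List.pyGetD arr i 0) X rs hX hpos
    simpa using ih _ _ h.1 h.2

-- ===== VERDICT (by name: the statement is the Claim_ definition above) =====
theorem solution_spec : Claim_equal_solution := by
  intro arr flag _ _
  unfold Spec_solution solution solution_alt
  rw [PySem.List.enumerate_eq_map_pyRange (d := 0), List.foldl_map]
  exact pvLoop arr flag (PySem.List.pyRange 0 arr.length 1) [] []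
    (by simp [pvExpand]) (by intro q hq; simp at hq)
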